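-- pv_equiv track=rewrite | github.com/SingleStepTests/v20 | test_tools/opcode_info.py | min_max_keys
-- ===== SOURCE A (Python) =====
-- def min_max_keys(d):
--     # Filter the dictionary to include only entries where the value is greater than 0
--     filtered_keys = [key for key, value in d.items() if value > 0]
--
--     # Check if the filtered list is not empty
--     if filtered_keys:
--         min_key = min(filtered_keys)
--         max_key = max(filtered_keys)
--         return min_key, max_key
--     else:
--         return 0, 0
-- ===== SOURCE B (Python) =====
-- def min_max_keys(d):
--     found = None
--     for key, value in d.items():
--         if value > 0:
--             if found is None:
--                 found = (key, key)
--             else: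
--                 mn, mx = found
--                 found = (key if key < mn else mn, key if mx < key else mx)
--     return found if found is not None else (0, 0)
-- ===== Notes on version B (the rewrite author's own statement) =====
-- stated objective: alternative
-- what changed: Replaced the filter-into-a-list plus separate min() and max() passes by one fold over d.items() carrying an optional (min,max) pair, so no intermediate list is built.
import Mathlib
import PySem

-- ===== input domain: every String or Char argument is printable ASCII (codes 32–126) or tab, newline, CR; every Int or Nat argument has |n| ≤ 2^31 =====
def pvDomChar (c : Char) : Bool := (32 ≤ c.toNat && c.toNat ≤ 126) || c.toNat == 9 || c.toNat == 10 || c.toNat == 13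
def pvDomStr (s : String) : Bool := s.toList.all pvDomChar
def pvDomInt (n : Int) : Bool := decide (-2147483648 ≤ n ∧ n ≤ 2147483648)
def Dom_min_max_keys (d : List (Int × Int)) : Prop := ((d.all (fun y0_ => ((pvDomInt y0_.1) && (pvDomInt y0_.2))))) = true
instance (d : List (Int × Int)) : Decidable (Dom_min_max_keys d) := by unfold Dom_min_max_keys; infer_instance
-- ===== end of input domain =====

-- B replaces A's filter-then-min()-then-max() by one fold over the items carrying an optional (min, max) pair.


-- ===== PORT A =====
-- filtered_keys = [key for key, value in d.items() if value > 0]; then min()/max() or (0,0)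
def min_max_keys (d : List (Int × Int)) : Int × Int :=
  let filtered_keys := (((PySem.Dict.ofList d).items.filter (fun kv => kv.2 > 0)).map (fun kv => kv.1))
  match PySem.List.min? filtered_keys (fun x => x), PySem.List.max? filtered_keys (fun x => x) with
  | some mn, some mx => (mn, mx)
  | _, _ => (0, 0)

-- ===== PORT B =====
-- one step of B's loop: fold an optional (min, max) pair over one item
def mmStep (acc : Option (Int × Int)) (kv : Int × Int) : Option (Int × Int) :=
  if kv.2 > 0 then
    match acc with
    | none => some (kv.1, kv.1)
    | some (mn, mx) => some (if kv.1 < mn then kv.1 else mn, if mx < kv.1 then kv.1 else mx)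
  else acc

def min_max_keys_alt (d : List (Int × Int)) : Int × Int :=
  ((PySem.Dict.ofList d).items.foldl mmStep none).getD (0, 0)

-- ===== PRECONDITION & SPEC =====
def Spec_min_max_keys (d : List (Int × Int)) (out : Int × Int) : Prop := out = min_max_keys_alt d
instance (d : List (Int × Int)) (out : Int × Int) : Decidable (Spec_min_max_keys d out) := by unfold Spec_min_max_keys; infer_instance

-- ===== CLAIM (what is proved, stated in full; the proofs are below) =====
def Claim_equal_min_max_keys : Prop := ∀ (d : List (Int × Int)), Dom_min_max_keys d → Spec_min_max_keys d (min_max_keys d)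

-- ===== LEMMAS AND PROOFS =====

-- the positive-valued keys of a list of items
def pvKeys (l : List (Int × Int)) : List Int := ((l.filter (fun kv => kv.2 > 0)).map (fun kv => kv.1))

theorem pvKeys_cons (k v : Int) (l : List (Int × Int)) :
    pvKeys ((k, v) :: l) = if v > 0 then k :: pvKeys l else pvKeys l := by
  by_cases h : v > 0 <;> simp [pvKeys, h]

theorem foldl_mmStep_some (l : List (Int × Int)) (mn mx : Int) :
    l.foldl mmStep (some (mn, mx)) =
      some ((pvKeys l).foldl min mn, (pvKeys l).foldl max mx) := by
  induction l generalizing mn mx with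
  | nil => simp [pvKeys]
  | cons kv t ih =>
    obtain ⟨k, v⟩ := kv
    rw [pvKeys_cons]
    by_cases h : v > 0
    · have e1 : (if k < mn then k else mn) = min mn k := by
        rcases lt_or_ge k mn with h1 | h1 <;> simp [min_def] <;> omega
      have e2 : (if mx < k then k else mx) = max mx k := by
        rcases lt_or_ge mx k with h1 | h1 <;> simp [max_def] <;> omega
      rw [if_pos h, List.foldl_cons]
      simp only [mmStep]
      rw [if_pos h, ih, e1, e2, List.foldl_cons, List.foldl_cons]
    · rw [if_neg h, List.foldl_cons]
      simp only [mmStep]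
      rw [if_neg h]
      exact ih mn mx

theorem foldl_mmStep_none (l : List (Int × Int)) :
    l.foldl mmStep none =
      match pvKeys l with
      | [] => none
      | x :: xs => some (xs.foldl min x, xs.foldl max x) := by
  induction l with
  | nil => simp [pvKeys]
  | cons kv t ih =>
    obtain ⟨k, v⟩ := kv
    rw [pvKeys_cons]
    by_cases h : v > 0
    · rw [if_pos h, List.foldl_cons]
      simp only [mmStep]
      rw [if_pos h, foldl_mmStep_some]
    · rw [if_neg h, List.foldl_cons]
      simp only [mmStep]
      rw [if_neg h, ih]

-- ===== VERDICT (by name: the statement is the Claim_ definition above) =====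
theorem min_max_keys_spec : Claim_equal_min_max_keys := by
  intro d _
  unfold Spec_min_max_keys min_max_keys min_max_keys_alt
  rw [foldl_mmStep_none]
  show (match PySem.List.min? (pvKeys _) _, PySem.List.max? (pvKeys _) _ with
        | some mn, some mx => (mn, mx) | _, _ => ((0 : Int), (0 : Int))) = _
  cases h : pvKeys ((PySem.Dict.ofList d).items) with
  | nil => simp [PySem.List.min?, PySem.List.max?]
  | cons x xs =>
    simp [PySem.List.min?_id_cons, PySem.List.max?_id_cons]
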